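-- pv_equiv track=rewrite | github.com/MarkusDarkus/mint_algo_24-25 | HomeTask(10.09.2024)/task_02.py | has_odd_cycle
-- ===== SOURCE A (Python) =====
-- def has_odd_cycle(adj_list):
--     # Фильтруем нечетные вершины
--     odd_vertices = [v for v in range(len(adj_list)) if v % 2 != 0]
--
--     # Создаем подграф для нечетных вершин
--     odd_graph = {v: [] for v in odd_vertices}
--     for v in odd_vertices:
--         for neighbor in adj_list[v]:
--             if neighbor in odd_vertices:
--                 odd_graph[v].append(neighbor)
--
--     # Функция для поиска цикла
--     def dfs(v, visited, parent):
--         visited.add(v)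
--         for neighbor in odd_graph[v]:
--             if neighbor not in visited:
--                 if dfs(neighbor, visited, v):
--                     return True
--             elif parent != neighbor:
--                 return True
--         return False
--
--     # Проверяем каждый нечетный узел
--     visited = set()
--     for v in odd_vertices:
--         if v not in visited:
--             if dfs(v, visited, -1):
--                 return True
--     return False
-- ===== SOURCE B (Python) =====
-- def has_odd_cycle(adj_list):
--     # same filtering and odd-subgraph construction as A
--     odd_vertices = [v for v in range(len(adj_list)) if v % 2 != 0]
--     odd_graph = {v: [] for v in odd_vertices}
--     for v in odd_vertices:
--         for neighbor in adj_list[v]: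
--             if neighbor in odd_vertices:
--                 odd_graph[v].append(neighbor)
--
--     # iterative DFS with an explicit stack of frames (vertex, parent, remaining neighbors)
--     visited = set()
--     for v in odd_vertices:
--         if v not in visited:
--             visited.add(v)
--             stack = [(v, -1, odd_graph[v])]
--             while stack:
--                 u, parent, rem = stack[-1]
--                 if not rem:
--                     stack.pop()
--                     continue
--                 n, rem = rem[0], rem[1:]
--                 stack[-1] = (u, parent, rem)
--                 if n not in visited:
--                     visited.add(n)
--                     stack.append((n, u, odd_graph[n]))
--                 elif n != parent:
--                     return True
--     return False
-- ===== Notes on version B (the rewrite author's own statement) =====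
-- stated objective: alternative
-- what changed: The recursive dfs is replaced by an iterative DFS with an explicit stack of (vertex, parent, remaining-neighbors) frames that reproduces the recursion's visit order, single-parent check and early return exactly; the odd-vertex filtering and subgraph construction are kept.
import Mathlib
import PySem

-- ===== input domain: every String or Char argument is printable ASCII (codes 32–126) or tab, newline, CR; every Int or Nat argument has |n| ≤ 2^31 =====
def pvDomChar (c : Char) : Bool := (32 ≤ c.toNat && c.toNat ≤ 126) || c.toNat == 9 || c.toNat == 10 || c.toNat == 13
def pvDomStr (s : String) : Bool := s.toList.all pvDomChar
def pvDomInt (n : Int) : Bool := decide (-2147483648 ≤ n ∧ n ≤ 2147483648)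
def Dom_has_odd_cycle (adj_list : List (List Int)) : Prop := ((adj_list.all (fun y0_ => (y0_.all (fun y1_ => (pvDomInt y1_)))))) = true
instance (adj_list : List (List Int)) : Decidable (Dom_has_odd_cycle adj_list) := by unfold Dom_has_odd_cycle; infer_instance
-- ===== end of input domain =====

-- B replaces A's recursive dfs with an explicit-stack iterative DFS (same filtering and
-- odd-subgraph construction); objective: alternative decomposition, same asymptotic cost.

-- ===== PORT A =====
-- shared preprocessing (identical lines in Source A and Source B):
-- odd_vertices = [v for v in range(len(adj_list)) if v % 2 != 0]
def pvOddVertices (adj_list : List (List Int)) : List Int :=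
  (PySem.List.pyRange 0 adj_list.length 1).filter (fun v => !(PySem.Int.mod v 2 == 0))

-- odd_graph = {v: [] for v in odd_vertices}; then the append loop over adj_list[v]
def pvOddGraph (adj_list : List (List Int)) : PySem.Dict Int (List Int) :=
  let odd := pvOddVertices adj_list
  let d0 := odd.foldl (fun d v => d.insert v ([] : List Int)) PySem.Dict.empty
  odd.foldl (fun d v =>
    (PySem.List.pyGetD adj_list v []).foldl
      (fun d n => if odd.contains n then d.modify v [] (fun l => l ++ [n]) else d) d) d0

-- odd_graph[u]; every u looked up is a key of odd_graph, so KeyError is unreachable (getD [])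
def pvNbrs (adj_list : List (List Int)) (u : Int) : List Int :=
  ((pvOddGraph adj_list).get? u).getD []

-- fuel bookkeeping (totalization only: the proofs show these bounds are never exhausted)
def pvUniverse (adj_list : List (List Int)) : List Int :=
  pvOddVertices adj_list ++ ((pvOddGraph adj_list).values).flatten

-- A's dfs: the loop 'for neighbor in odd_graph[v]' with early returns; fuel = recursion depth
def pvLoopA (g : Int → List Int) (f : Nat) (ns : List Int) (vis : PySem.Set Int)
    (v p : Int) : Option (Bool × PySem.Set Int) :=
  match ns with
  | [] => some (false, vis)
  | n :: rest =>
    if ¬ PySem.Set.contains vis n then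
      match f with
      | 0 => none
      | f' + 1 =>
        match pvLoopA g f' (g n) (PySem.Set.add vis n) n v with
        | none => none
        | some (true, vis') => some (true, vis')
        | some (false, vis') => pvLoopA g (f' + 1) rest vis' v p
    else if p ≠ n then some (true, vis)
    else pvLoopA g f rest vis v p
termination_by (f, ns.length)

-- dfs(v, visited, parent): visited.add(v), then the neighbor loop
def pvDfsA (g : Int → List Int) (f : Nat) (v : Int) (vis : PySem.Set Int) (p : Int) :
    Option (Bool × PySem.Set Int) :=
  match f with
  | 0 => none
  | f' + 1 => pvLoopA g f' (g v) (PySem.Set.add vis v) v p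

-- 'for v in odd_vertices: if v not in visited: if dfs(v, visited, -1): return True'
def pvOuterA (g : Int → List Int) (vs : List Int) (fA : Nat) (vis : PySem.Set Int) :
    Option Bool :=
  match vs with
  | [] => some false
  | v :: vs' =>
    if ¬ PySem.Set.contains vis v then
      match pvDfsA g fA v vis (-1) with
      | none => none
      | some (true, _) => some true
      | some (false, vis') => pvOuterA g vs' fA vis'
    else pvOuterA g vs' fA vis

def has_odd_cycle (adj_list : List (List Int)) : Bool :=
  let g := pvNbrs adj_list
  ((pvOuterA g (pvOddVertices adj_list) ((pvUniverse adj_list).length + 1)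
      PySem.Set.empty).getD false)

-- ===== PORT B =====
-- Source B's 'while stack' loop; a frame is (vertex, parent, remaining neighbors); fuel = steps
def pvRunB (g : Int → List Int) (f : Nat) (stack : List (Int × Int × List Int))
    (vis : PySem.Set Int) : Option (Bool × PySem.Set Int) :=
  match stack with
  | [] => some (false, vis)
  | (v, p, ns) :: rest =>
    match f with
    | 0 => none
    | f' + 1 =>
      match ns with
      | [] => pvRunB g f' rest vis
      | n :: ns' =>
        if ¬ PySem.Set.contains vis n then
          pvRunB g f' ((n, v, g n) :: (v, p, ns') :: rest) (PySem.Set.add vis n)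
        else if p ≠ n then some (true, vis)
        else pvRunB g f' ((v, p, ns') :: rest) vis

-- step-count fuel that the proofs show is never exhausted
def pvFuelB (adj_list : List (List Int)) : Nat :=
  ((pvUniverse adj_list).length + 1) *
    (((pvUniverse adj_list).map (fun u => (pvNbrs adj_list u).length)).sum + 2)

-- Source B's outer loop: seed a one-frame stack per unvisited odd vertex and run the machine
def pvOuterB (g : Int → List Int) (vs : List Int) (fB : Nat) (vis : PySem.Set Int) :
    Option Bool :=
  match vs with
  | [] => some false
  | v :: vs' =>
    if ¬ PySem.Set.contains vis v then
      match pvRunB g fB [(v, -1, g v)] (PySem.Set.add vis v) with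
      | none => none
      | some (true, _) => some true
      | some (false, vis') => pvOuterB g vs' fB vis'
    else pvOuterB g vs' fB vis

def has_odd_cycle_alt (adj_list : List (List Int)) : Bool :=
  let g := pvNbrs adj_list
  ((pvOuterB g (pvOddVertices adj_list) (pvFuelB adj_list) PySem.Set.empty).getD false)

-- ===== PRECONDITION & SPEC =====
def Spec_has_odd_cycle (adj_list : List (List Int)) (out : Bool) : Prop := out = has_odd_cycle_alt adj_list
instance (adj_list : List (List Int)) (out : Bool) : Decidable (Spec_has_odd_cycle adj_list out) := by unfold Spec_has_odd_cycle; infer_instance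

-- ===== CLAIM (what is proved, stated in full; the proofs are below) =====
def Claim_equal_has_odd_cycle : Prop := ∀ (adj_list : List (List Int)), Dom_has_odd_cycle adj_list → Spec_has_odd_cycle adj_list (has_odd_cycle adj_list)

-- ===== LEMMAS AND PROOFS =====

-- number of not-yet-visited vertices of the universe U
def pvCnt (U : List Int) (vis : PySem.Set Int) : Nat :=
  (U.filter (fun x => !PySem.Set.contains vis x)).length

theorem pvCnt_le_length (U : List Int) (vis : PySem.Set Int) : pvCnt U vis ≤ U.length :=
  List.length_filter_le _ _

theorem pvFilterLenMono {α : Type} (p q : α → Bool) (h : ∀ x, p x = true → q x = true) :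
    ∀ l : List α, (l.filter p).length ≤ (l.filter q).length := by
  intro l
  induction l with
  | nil => simp
  | cons x xs ih =>
    by_cases hx : p x = true
    · simp [hx, h x hx]; omega
    · simp only [List.filter_cons]
      rw [if_neg (by simp [hx])]
      by_cases hq : q x = true
      · rw [if_pos hq]; simp; omega
      · rw [if_neg (by simp [hq])]; exact ih

theorem pvContains_add_imp (vis : PySem.Set Int) (n x : Int) :
    (!PySem.Set.contains (PySem.Set.add vis n) x) = true →
    (!PySem.Set.contains vis x) = true := by
  simp only [Bool.not_eq_true', PySem.Set.contains_eq_listContains,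
    List.contains_eq_mem, decide_eq_false_iff_not]
  intro hx hmem
  exact hx (by simpa [PySem.Set.mem_add] using Or.inl hmem)

theorem pvCnt_add_le (U : List Int) (vis : PySem.Set Int) (n : Int) :
    pvCnt U (PySem.Set.add vis n) ≤ pvCnt U vis :=
  pvFilterLenMono _ _ (pvContains_add_imp vis n) U

theorem pvCnt_add_lt (U : List Int) (vis : PySem.Set Int) (n : Int)
    (hn : n ∈ U) (hnv : PySem.Set.contains vis n = false) :
    pvCnt U (PySem.Set.add vis n) < pvCnt U vis := by
  unfold pvCnt
  have hnU : (!PySem.Set.contains vis n) = true := by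
    simp only [Bool.not_eq_true']; exact hnv
  have hnU' : ¬ ((!PySem.Set.contains (PySem.Set.add vis n) n) = true) := by
    simp [PySem.Set.contains_eq_listContains, List.contains_eq_mem, PySem.Set.mem_add]
  obtain ⟨l1, l2, rfl⟩ := List.append_of_mem hn
  simp only [List.filter_append, List.length_append, List.filter_cons]
  have h1 := pvFilterLenMono _ _ (pvContains_add_imp vis n) l1
  have h2 := pvFilterLenMono _ _ (pvContains_add_imp vis n) l2
  rw [if_pos hnU, if_neg hnU']
  simp only [List.length_cons]
  omega

-- cnt is positive while an unvisited universe vertex exists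
theorem pvCnt_pos (U : List Int) (vis : PySem.Set Int) (n : Int)
    (hn : n ∈ U) (hnv : PySem.Set.contains vis n = false) : 1 ≤ pvCnt U vis := by
  unfold pvCnt
  have hmem : n ∈ U.filter (fun x => !PySem.Set.contains vis x) :=
    List.mem_filter.2 ⟨hn, by simp only [Bool.not_eq_true']; exact hnv⟩
  have := List.ne_nil_of_mem hmem
  have := List.length_pos_of_ne_nil this
  omega

-- A's dfs always returns within the depth fuel, and never un-visits a vertex
theorem pvLoopA_total (g : Int → List Int) (U : List Int)
    (hU : ∀ u, ∀ n ∈ g u, n ∈ U) :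
    ∀ (f : Nat) (ns : List Int) (vis : PySem.Set Int) (v p : Int),
      (∀ n ∈ ns, n ∈ U) → pvCnt U vis ≤ f →
      ∃ b vis', pvLoopA g f ns vis v p = some (b, vis') ∧ pvCnt U vis' ≤ pvCnt U vis := by
  intro f ns vis v p
  induction f, ns, vis, v, p using pvLoopA.induct (g := g) with
  | case1 f vis v p =>
    intro _ _
    exact ⟨false, vis, by rw [pvLoopA], le_refl _⟩
  | case2 vis v p n rest hc =>
    intro hns hcnt
    have := pvCnt_pos U vis n (hns n (by simp)) (by simpa using hc)
    omega
  | case3 vis v p n rest hc f' hnone ih =>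
    intro hns hcnt
    have hlt := pvCnt_add_lt U vis n (hns n (by simp)) (by simpa using hc)
    obtain ⟨b, vis', heq, _⟩ := ih (fun m hm => hU n m hm) (by omega)
    rw [heq] at hnone; exact absurd hnone (by simp)
  | case4 vis v p n rest hc f' vis' heq ih =>
    intro hns hcnt
    have hlt := pvCnt_add_lt U vis n (hns n (by simp)) (by simpa using hc)
    obtain ⟨b0, vis0, heq0, hle0⟩ := ih (fun m hm => hU n m hm) (by omega)
    rw [heq] at heq0
    obtain ⟨hb, hv⟩ : true = b0 ∧ vis' = vis0 := by simpa using heq0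
    subst hv
    have hle1 := pvCnt_add_le U vis n
    refine ⟨true, vis', ?_, by omega⟩
    rw [pvLoopA, if_pos hc]; simp [heq]
  | case5 vis v p n rest hc f' vis' heq ihInner ihRest =>
    intro hns hcnt
    have hlt := pvCnt_add_lt U vis n (hns n (by simp)) (by simpa using hc)
    obtain ⟨b0, vis0, heq0, hle0⟩ := ihInner (fun m hm => hU n m hm) (by omega)
    rw [heq] at heq0
    obtain ⟨hb, hv⟩ : false = b0 ∧ vis' = vis0 := by simpa using heq0
    subst hv
    have hle1 := pvCnt_add_le U vis n
    obtain ⟨b, vis₂, heq₂, hle₂⟩ := ihRest (fun m hm => hns m (by simp [hm])) (by omega)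
    refine ⟨b, vis₂, ?_, by omega⟩
    rw [pvLoopA, if_pos hc]; simp [heq, heq₂]
  | case6 f vis v p n rest hc hp =>
    intro _ _
    refine ⟨true, vis, ?_, le_refl _⟩
    cases f with
    | zero => rw [pvLoopA, if_neg hc, if_pos hp]
    | succ f' => rw [pvLoopA, if_neg hc, if_pos hp]
  | case7 f vis v p n rest hc hp ih =>
    intro hns hcnt
    obtain ⟨b, vis', heq, hle⟩ := ih (fun m hm => hns m (by simp [hm])) hcnt
    refine ⟨b, vis', ?_, hle⟩
    cases f with
    | zero => rw [pvLoopA, if_neg hc, if_neg hp]; exact heq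
    | succ f' => rw [pvLoopA, if_neg hc, if_neg hp]; exact heq

theorem pvRunB_nil (g : Int → List Int) (f : Nat) (vis : PySem.Set Int) :
    pvRunB g f [] vis = some (false, vis) := by cases f <;> rfl

theorem pvRunB_pop (g : Int → List Int) (f : Nat) (v p : Int)
    (rest : List (Int × Int × List Int)) (vis : PySem.Set Int) :
    pvRunB g (f + 1) ((v, p, []) :: rest) vis = pvRunB g f rest vis := by
  rw [pvRunB]

theorem pvRunB_push (g : Int → List Int) (f : Nat) (v p n : Int) (ns' : List Int)
    (rest : List (Int × Int × List Int)) (vis : PySem.Set Int)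
    (h : PySem.Set.contains vis n = false) :
    pvRunB g (f + 1) ((v, p, n :: ns') :: rest) vis =
      pvRunB g f ((n, v, g n) :: (v, p, ns') :: rest) (PySem.Set.add vis n) := by
  rw [pvRunB, if_pos (by simp only [h]; exact Bool.false_ne_true)]

theorem pvRunB_true (g : Int → List Int) (f : Nat) (v p n : Int) (ns' : List Int)
    (rest : List (Int × Int × List Int)) (vis : PySem.Set Int)
    (h : PySem.Set.contains vis n = true) (hp : p ≠ n) :
    pvRunB g (f + 1) ((v, p, n :: ns') :: rest) vis = some (true, vis) := by
  rw [pvRunB, if_neg (by simp only [h]; simp), if_pos hp]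

theorem pvRunB_skip (g : Int → List Int) (f : Nat) (v p n : Int) (ns' : List Int)
    (rest : List (Int × Int × List Int)) (vis : PySem.Set Int)
    (h : PySem.Set.contains vis n = true) (hp : ¬ p ≠ n) :
    pvRunB g (f + 1) ((v, p, n :: ns') :: rest) vis =
      pvRunB g f ((v, p, ns') :: rest) vis := by
  rw [pvRunB, if_neg (by simp only [h]; simp), if_neg hp]

theorem pvRunB_mono (g : Int → List Int) :
    ∀ (f f' : Nat) (stack : List (Int × Int × List Int)) (vis : PySem.Set Int)
      (r : Bool × PySem.Set Int), f ≤ f' → pvRunB g f stack vis = some r →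
      pvRunB g f' stack vis = some r := by
  intro f
  induction f with
  | zero =>
    intro f' stack vis r _ heq
    cases stack with
    | nil => rw [pvRunB_nil] at heq ⊢; exact heq
    | cons fr rest =>
      obtain ⟨v, p, ns⟩ := fr
      rw [pvRunB] at heq
      exact absurd heq (by simp)
  | succ fn ih =>
    intro f' stack vis r hle heq
    cases stack with
    | nil => rw [pvRunB_nil] at heq ⊢; exact heq
    | cons fr rest =>
      obtain ⟨v, p, ns⟩ := fr
      obtain ⟨fn', rfl⟩ : ∃ k, f' = k + 1 := ⟨f' - 1, by omega⟩
      have hle' : fn ≤ fn' := by omega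
      cases ns with
      | nil =>
        rw [pvRunB_pop] at heq ⊢
        exact ih fn' rest vis r hle' heq
      | cons n ns' =>
        by_cases hcv : PySem.Set.contains vis n = true
        · by_cases hp : p ≠ n
          · rw [pvRunB_true g fn v p n ns' rest vis hcv hp] at heq
            rw [pvRunB_true g fn' v p n ns' rest vis hcv hp]
            exact heq
          · rw [pvRunB_skip g fn v p n ns' rest vis hcv hp] at heq
            rw [pvRunB_skip g fn' v p n ns' rest vis hcv hp]
            exact ih fn' _ vis r hle' heq
        · have hcv' : PySem.Set.contains vis n = false := by simpa using hcv
          rw [pvRunB_push g fn v p n ns' rest vis hcv'] at heq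
          rw [pvRunB_push g fn' v p n ns' rest vis hcv']
          exact ih fn' _ _ r hle' heq

-- the machine's measure
def pvMu (U : List Int) (W : Nat) (stack : List (Int × Int × List Int))
    (vis : PySem.Set Int) : Nat :=
  pvCnt U vis * W + (stack.map (fun fr => fr.2.2.length + 1)).sum

-- B's machine always returns within the step fuel
theorem pvRunB_total (g : Int → List Int) (U : List Int) (W : Nat)
    (hU : ∀ u, ∀ n ∈ g u, n ∈ U)
    (hW : ∀ n ∈ U, (g n).length + 2 ≤ W) :
    ∀ (f : Nat) (stack : List (Int × Int × List Int)) (vis : PySem.Set Int),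
      (∀ fr ∈ stack, ∀ n ∈ fr.2.2, n ∈ U) → pvMu U W stack vis < f →
      ∃ r, pvRunB g f stack vis = some r := by
  intro f
  induction f with
  | zero => intro stack vis _ hμ; exact absurd hμ (by omega)
  | succ fn ih =>
    intro stack vis hinv hμ
    cases stack with
    | nil => exact ⟨(false, vis), pvRunB_nil g _ vis⟩
    | cons fr rest =>
      obtain ⟨v, p, ns⟩ := fr
      cases ns with
      | nil =>
        rw [pvRunB_pop]
        apply ih rest vis (fun fr hfr => hinv fr (by simp [hfr]))
        simp only [pvMu, List.map_cons, List.sum_cons] at hμ ⊢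
        omega
      | cons n ns' =>
        by_cases hcv : PySem.Set.contains vis n = true
        · by_cases hp : p ≠ n
          · exact ⟨(true, vis), pvRunB_true g fn v p n ns' rest vis hcv hp⟩
          · rw [pvRunB_skip g fn v p n ns' rest vis hcv hp]
            apply ih _ vis
            · intro fr hfr m hm
              rw [List.mem_cons] at hfr
              rcases hfr with rfl | hfr
              · exact hinv (v, p, n :: ns') (by simp) m (List.mem_cons_of_mem _ hm)
              · exact hinv fr (List.mem_cons_of_mem _ hfr) m hm
            · simp only [pvMu, List.map_cons, List.sum_cons, List.length_cons] at hμ ⊢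
              omega
        · have hcv' : PySem.Set.contains vis n = false := by simpa using hcv
          rw [pvRunB_push g fn v p n ns' rest vis hcv']
          have hnU : n ∈ U := hinv (v, p, n :: ns') (by simp) n (by simp)
          have hlt := pvCnt_add_lt U vis n hnU hcv'
          have hWn := hW n hnU
          have hmul : pvCnt U (PySem.Set.add vis n) * W + W ≤ pvCnt U vis * W := by
            have h1 : pvCnt U (PySem.Set.add vis n) + 1 ≤ pvCnt U vis := hlt
            calc pvCnt U (PySem.Set.add vis n) * W + W
                = (pvCnt U (PySem.Set.add vis n) + 1) * W := by ring
              _ ≤ pvCnt U vis * W := Nat.mul_le_mul_right W h1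
          apply ih
          · intro fr hfr m hm
            rw [List.mem_cons] at hfr
            rcases hfr with rfl | hfr
            · exact hU n m hm
            · rw [List.mem_cons] at hfr
              rcases hfr with rfl | hfr
              · exact hinv (v, p, n :: ns') (by simp) m (List.mem_cons_of_mem _ hm)
              · exact hinv fr (List.mem_cons_of_mem _ hfr) m hm
          · simp only [pvMu, List.map_cons, List.sum_cons, List.length_cons] at hμ ⊢
            omega

-- simulation: one dfs neighbour-loop = the machine run from the corresponding frame
theorem pvSimLoop (g : Int → List Int) :
    ∀ (fA : Nat) (ns : List Int) (vis : PySem.Set Int) (v p : Int)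
      (b : Bool) (vis₂ : PySem.Set Int),
      pvLoopA g fA ns vis v p = some (b, vis₂) →
      ∃ k, ∀ (rest : List (Int × Int × List Int)) (fB : Nat),
        pvRunB g (k + fB) ((v, p, ns) :: rest) vis =
          if b then some (true, vis₂) else pvRunB g fB rest vis₂ := by
  intro fA ns vis v p
  induction fA, ns, vis, v, p using pvLoopA.induct (g := g) with
  | case1 f vis v p =>
    intro b vis₂ hres
    rw [pvLoopA] at hres
    obtain ⟨rfl, rfl⟩ : false = b ∧ vis = vis₂ := by simpa using hres
    refine ⟨1, fun rest fB => ?_⟩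
    rw [Nat.add_comm 1 fB, pvRunB_pop, if_neg (by simp)]
  | case2 vis v p n rest0 hc =>
    intro b vis₂ hres
    rw [pvLoopA, if_pos hc] at hres
    exact absurd hres (by simp)
  | case3 vis v p n rest0 hc f' hnone ih =>
    intro b vis₂ hres
    rw [pvLoopA, if_pos hc, hnone] at hres
    exact absurd hres (by simp)
  | case4 vis v p n rest0 hc f' vis' heq ih =>
    intro b vis₂ hres
    rw [pvLoopA, if_pos hc, heq] at hres
    obtain ⟨rfl, rfl⟩ : true = b ∧ vis' = vis₂ := by simpa using hres
    obtain ⟨k1, hk1⟩ := ih true vis' heq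
    have hcv : PySem.Set.contains vis n = false := by simpa using hc
    refine ⟨k1 + 1, fun rest fB => ?_⟩
    have harith : k1 + 1 + fB = (k1 + fB) + 1 := by omega
    rw [harith, pvRunB_push g (k1 + fB) v p n rest0 rest vis hcv]
    have := hk1 ((v, p, rest0) :: rest) fB
    rw [if_pos rfl] at this
    rw [this, if_pos rfl]
  | case5 vis v p n rest0 hc f' vis' heq ihInner ihRest =>
    intro b vis₂ hres
    rw [pvLoopA, if_pos hc, heq] at hres
    obtain ⟨k1, hk1⟩ := ihInner false vis' heq
    obtain ⟨k2, hk2⟩ := ihRest b vis₂ hres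
    have hcv : PySem.Set.contains vis n = false := by simpa using hc
    refine ⟨1 + k1 + k2, fun rest fB => ?_⟩
    have harith : 1 + k1 + k2 + fB = (k1 + (k2 + fB)) + 1 := by omega
    rw [harith, pvRunB_push g (k1 + (k2 + fB)) v p n rest0 rest vis hcv]
    have h1 := hk1 ((v, p, rest0) :: rest) (k2 + fB)
    rw [if_neg (by simp)] at h1
    rw [h1]
    exact hk2 rest fB
  | case6 f vis v p n rest0 hc hp =>
    intro b vis₂ hres
    have hcv : PySem.Set.contains vis n = true := by simpa using hc
    cases f with
    | zero => rw [pvLoopA, if_neg hc, if_pos hp] at hres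
              obtain ⟨rfl, rfl⟩ : true = b ∧ vis = vis₂ := by simpa using hres
              refine ⟨1, fun rest fB => ?_⟩
              rw [Nat.add_comm 1 fB, pvRunB_true g fB v p n rest0 rest vis hcv hp, if_pos rfl]
    | succ f' => rw [pvLoopA, if_neg hc, if_pos hp] at hres
                 obtain ⟨rfl, rfl⟩ : true = b ∧ vis = vis₂ := by simpa using hres
                 refine ⟨1, fun rest fB => ?_⟩
                 rw [Nat.add_comm 1 fB, pvRunB_true g fB v p n rest0 rest vis hcv hp, if_pos rfl]
  | case7 f vis v p n rest0 hc hp ih =>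
    intro b vis₂ hres
    have hcv : PySem.Set.contains vis n = true := by simpa using hc
    have hres' : pvLoopA g f rest0 vis v p = some (b, vis₂) := by
      cases f with
      | zero => rw [pvLoopA, if_neg hc, if_neg hp] at hres; exact hres
      | succ f' => rw [pvLoopA, if_neg hc, if_neg hp] at hres; exact hres
    obtain ⟨k2, hk2⟩ := ih b vis₂ hres'
    refine ⟨k2 + 1, fun rest fB => ?_⟩
    have harith : k2 + 1 + fB = (k2 + fB) + 1 := by omega
    rw [harith, pvRunB_skip g (k2 + fB) v p n rest0 rest vis hcv hp]
    exact hk2 rest fB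

-- both outer loops agree, component by component
theorem pvOuterEq (g : Int → List Int) (U : List Int) (W : Nat)
    (hU : ∀ u, ∀ n ∈ g u, n ∈ U) (hW : ∀ n ∈ U, (g n).length + 2 ≤ W) :
    ∀ (vs : List Int) (vis : PySem.Set Int), (∀ v ∈ vs, v ∈ U) →
    ∃ r, pvOuterA g vs (U.length + 1) vis = some r ∧
         pvOuterB g vs ((U.length + 1) * W) vis = some r := by
  intro vs
  induction vs with
  | nil => exact fun vis _ => ⟨false, rfl, rfl⟩
  | cons v vs' ih =>
    intro vis hvs
    have hvU : v ∈ U := hvs v (by simp)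
    by_cases hcv : PySem.Set.contains vis v = true
    · obtain ⟨r, hA, hB⟩ := ih vis (fun w hw => hvs w (List.mem_cons_of_mem _ hw))
      refine ⟨r, ?_, ?_⟩
      · rw [pvOuterA, if_neg (by simp only [not_not]; exact hcv)]; exact hA
      · rw [pvOuterB, if_neg (by simp only [not_not]; exact hcv)]; exact hB
    · -- unvisited component: A's dfs terminates, the machine simulates it
      have hcnt : pvCnt U (PySem.Set.add vis v) ≤ U.length :=
        pvCnt_le_length U _
      obtain ⟨b, vis₂, heqA, _⟩ :=
        pvLoopA_total g U hU U.length (g v) (PySem.Set.add vis v) v (-1)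
          (fun m hm => hU v m hm) hcnt
      have hWv := hW v hvU
      have hmul : pvCnt U (PySem.Set.add vis v) * W ≤ U.length * W :=
        Nat.mul_le_mul_right W hcnt
      have hmu : pvMu U W [(v, -1, g v)] (PySem.Set.add vis v) < (U.length + 1) * W := by
        simp only [pvMu, List.map_cons, List.map_nil, List.sum_cons, List.sum_nil]
        have : (U.length + 1) * W = U.length * W + W := by ring
        omega
      obtain ⟨r0, heqB0⟩ :=
        pvRunB_total g U W hU hW ((U.length + 1) * W) [(v, -1, g v)]
          (PySem.Set.add vis v)
          (by intro fr hfr m hm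
              simp only [List.mem_singleton] at hfr
              subst hfr
              exact hU v m hm)
          hmu
      obtain ⟨k, hk⟩ := pvSimLoop g U.length (g v) (PySem.Set.add vis v) v (-1) b vis₂ heqA
      have hkRun : pvRunB g k [(v, -1, g v)] (PySem.Set.add vis v) = some (b, vis₂) := by
        have := hk [] 0
        rw [Nat.add_zero] at this
        cases b
        · rw [if_neg (by simp)] at this; rw [this, pvRunB_nil]
        · rw [if_pos rfl] at this; rw [this]
      have hr0 : r0 = (b, vis₂) := by
        have h1 := pvRunB_mono g ((U.length + 1) * W) (k + (U.length + 1) * W) _ _ r0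
          (by omega) heqB0
        have h2 := pvRunB_mono g k (k + (U.length + 1) * W) _ _ (b, vis₂)
          (by omega) hkRun
        rw [h1] at h2
        exact Option.some.inj h2
      subst hr0
      have hdfs : pvDfsA g (U.length + 1) v vis (-1) = some (b, vis₂) := by
        rw [pvDfsA]; exact heqA
      cases b with
      | true =>
        refine ⟨true, ?_, ?_⟩
        · rw [pvOuterA, if_pos hcv, hdfs]
        · rw [pvOuterB, if_pos hcv, heqB0]
      | false =>
        obtain ⟨r, hA, hB⟩ := ih vis₂ (fun w hw => hvs w (List.mem_cons_of_mem _ hw))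
        refine ⟨r, ?_, ?_⟩
        · rw [pvOuterA, if_pos hcv, hdfs]; exact hA
        · rw [pvOuterB, if_pos hcv, heqB0]; exact hB

theorem pvMain (adj_list : List (List Int)) :
    has_odd_cycle adj_list = has_odd_cycle_alt adj_list := by
  have hU : ∀ u, ∀ n ∈ pvNbrs adj_list u, n ∈ pvUniverse adj_list := by
    intro u n hn
    unfold pvNbrs at hn
    cases h : (pvOddGraph adj_list).get? u with
    | none => rw [h] at hn; simp at hn
    | some val =>
      rw [h] at hn
      simp only [Option.getD_some] at hn
      have hitems := PySem.Dict.mem_items_of_get?_eq_some (pvOddGraph adj_list) h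
      unfold pvUniverse
      apply List.mem_append_right
      apply List.mem_flatten.2
      refine ⟨val, ?_, hn⟩
      simp only [PySem.Dict.values]
      exact List.mem_map.2 ⟨(u, val), hitems, rfl⟩
  have hW : ∀ n ∈ pvUniverse adj_list,
      (pvNbrs adj_list n).length + 2 ≤
        ((pvUniverse adj_list).map (fun u => (pvNbrs adj_list u).length)).sum + 2 := by
    intro n hn
    have hmem : (pvNbrs adj_list n).length ∈
        (pvUniverse adj_list).map (fun u => (pvNbrs adj_list u).length) :=
      List.mem_map.2 ⟨n, hn, rfl⟩
    have := List.single_le_sum (fun (x : Nat) _ => Nat.zero_le x) _ hmem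
    omega
  have hodd : ∀ v ∈ pvOddVertices adj_list, v ∈ pvUniverse adj_list := by
    intro v hv
    exact List.mem_append_left _ hv
  obtain ⟨r, hA, hB⟩ :=
    pvOuterEq (pvNbrs adj_list) (pvUniverse adj_list)
      (((pvUniverse adj_list).map (fun u => (pvNbrs adj_list u).length)).sum + 2)
      hU hW (pvOddVertices adj_list) PySem.Set.empty hodd
  unfold has_odd_cycle has_odd_cycle_alt pvFuelB
  show (pvOuterA (pvNbrs adj_list) (pvOddVertices adj_list)
      ((pvUniverse adj_list).length + 1) PySem.Set.empty).getD false =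
    (pvOuterB (pvNbrs adj_list) (pvOddVertices adj_list)
      (((pvUniverse adj_list).length + 1) *
        (((pvUniverse adj_list).map (fun u => (pvNbrs adj_list u).length)).sum + 2))
      PySem.Set.empty).getD false
  rw [hA, hB]

-- ===== VERDICT (by name: the statement is the Claim_ definition above) =====
theorem has_odd_cycle_spec : Claim_equal_has_odd_cycle := by
  intro adj_list _
  unfold Spec_has_odd_cycle
  exact pvMain adj_list
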